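-- pv_equiv track=rewrite | github.com/IBPA/GNN | prep/run_divide_data.py | get_expr_ko_info
-- ===== SOURCE A (Python) =====
-- def get_expr_ko_info(line):
--     parts = line.split(' D ')
--     rKOs = []
--
--     for i in range(1, len(parts)):
--         curr = parts[i]
--         gene_name = curr.split(' ')[0]
--         rKOs.append(gene_name)
--
--     return '/'.join(rKOs)
-- ===== SOURCE B (Python) =====
-- import re
--
-- def get_expr_ko_info(line):
--     return '/'.join(re.findall(r' D ([^ ]*)', line))
-- ===== Notes on version B (the rewrite author's own statement) =====
-- stated objective: idiomatic
-- what changed: Replaces the split-on-' D '-then-take-first-token loop with a single regex pass that captures, after each ' D ' marker, the maximal run of non-space characters.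
import Mathlib
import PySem

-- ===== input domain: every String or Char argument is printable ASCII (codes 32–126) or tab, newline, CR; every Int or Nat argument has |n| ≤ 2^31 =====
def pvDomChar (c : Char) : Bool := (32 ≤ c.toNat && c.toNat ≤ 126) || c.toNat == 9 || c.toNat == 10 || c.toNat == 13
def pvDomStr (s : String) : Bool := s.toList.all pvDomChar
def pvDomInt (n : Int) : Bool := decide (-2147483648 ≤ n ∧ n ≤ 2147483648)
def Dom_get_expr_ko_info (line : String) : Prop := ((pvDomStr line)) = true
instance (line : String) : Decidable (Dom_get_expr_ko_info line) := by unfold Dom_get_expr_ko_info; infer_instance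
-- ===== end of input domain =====

-- B replaces A's split-on-' D '-then-take-first-token loop with a single regex scan; objective: idiomatic.

-- ===== PORT A =====
-- line.split(' D '); for i in range(1, len(parts)): append parts[i].split(' ')[0]; '/'.join
def get_expr_ko_info (line : String) : String :=
  let parts := (PySem.Str.split? line " D ").getD []
  let rKOs := (parts.drop 1).foldl
    (fun acc curr => acc ++ [(((PySem.Str.split? curr " ").getD []).headD "")]) ([] : List String)
  PySem.Str.join "/" rKOs

-- ===== PORT B =====
-- Hand port of re.findall(r' D ([^ ]*)', line): PySem has no regex, so this is the exact
-- leftmost, non-overlapping scan for this fixed pattern — on each ' D ' match capture the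
-- maximal run of non-space characters and resume right after it.
def pvFindall : List Char → List (List Char)
  | [] => []
  | c :: rest =>
    if ([' ', 'D', ' ']).isPrefixOf (c :: rest) then
      let tok := ((c :: rest).drop 3).takeWhile (· ≠ ' ')
      tok :: pvFindall (((c :: rest).drop 3).drop tok.length)
    else pvFindall rest
termination_by l => l.length
decreasing_by all_goals simp [List.length_drop]

def get_expr_ko_info_alt (line : String) : String :=
  PySem.Str.join "/" ((pvFindall line.toList).map String.ofList)

-- ===== PRECONDITION & SPEC =====
def Spec_get_expr_ko_info (line : String) (out : String) : Prop := out = get_expr_ko_info_alt line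
instance (line : String) (out : String) : Decidable (Spec_get_expr_ko_info line out) := by unfold Spec_get_expr_ko_info; infer_instance

-- ===== CLAIM (what is proved, stated in full; the proofs are below) =====
def Claim_equal_get_expr_ko_info : Prop := ∀ (line : String), Dom_get_expr_ko_info line → Spec_get_expr_ko_info line (get_expr_ko_info line)

-- ===== LEMMAS AND PROOFS =====

-- proof-side helpers

/-- apply f to the head of a list, if any -/
def pvModHead (f : List Char → List Char) : List (List Char) → List (List Char)
  | [] => []
  | x :: xs => f x :: xs

/-- fuel-free restatement of PySem.Chars.splitOn (for non-empty sep; 'max 1' only for termination) -/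
def pvSplit (sep : List Char) : List Char → List (List Char)
  | [] => [[]]
  | c :: rest =>
    if sep.isPrefixOf (c :: rest) then [] :: pvSplit sep ((c :: rest).drop (max 1 sep.length))
    else pvModHead (c :: ·) (pvSplit sep rest)
termination_by l => l.length
decreasing_by all_goals simp [List.length_drop]

lemma pvGoEq (sep : List Char) (hs : 0 < sep.length) :
    ∀ (fuel : Nat) (l cur : List Char) (out : List (List Char)), l.length ≤ fuel →
    PySem.Chars.splitOn.go sep fuel l cur out.reverse =
      out ++ pvModHead (cur.reverse ++ ·) (pvSplit sep l) := by
  intro fuel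
  induction fuel with
  | zero =>
    intro l cur out h
    have hl : l = [] := List.eq_nil_of_length_eq_zero (Nat.le_zero.mp h)
    subst hl
    simp [PySem.Chars.splitOn.go, pvSplit, pvModHead]
  | succ fuel ih =>
    intro l cur out h
    cases l with
    | nil => simp [PySem.Chars.splitOn.go, pvSplit, pvModHead]
    | cons c rest =>
      by_cases hp : sep.isPrefixOf (c :: rest)
      · have h2 : ((c :: rest).drop sep.length).length ≤ fuel := by
          simp only [List.length_drop, List.length_cons] at *
          omega
        have hrw : (cur.reverse :: out.reverse) = (out ++ [cur.reverse]).reverse := by simp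
        have hmax : max 1 sep.length = sep.length := by omega
        simp only [PySem.Chars.splitOn.go, hp, if_true]
        rw [hrw, ih _ [] (out ++ [cur.reverse]) h2]
        rw [pvSplit]
        simp only [hp, if_true, hmax, pvModHead]
        cases pvSplit sep (List.drop sep.length (c :: rest)) <;> simp
      · have h2 : rest.length ≤ fuel := by
          simp only [List.length_cons] at h; omega
        simp only [PySem.Chars.splitOn.go, hp]
        rw [ih rest (c :: cur) out h2]
        rw [pvSplit]
        simp only [hp]
        cases pvSplit sep rest <;> simp [pvModHead]

lemma pvSplitOn_eq (sep : List Char) (hs : 0 < sep.length) (l : List Char) :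
    PySem.Chars.splitOn l sep = pvSplit sep l := by
  have := pvGoEq sep hs (l.length + 1) l [] [] (by omega)
  simp only [List.reverse_nil, List.nil_append] at this
  rw [PySem.Chars.splitOn, this]
  cases pvSplit sep l <;> simp [pvModHead]

lemma pvSplit_ne_nil (sep : List Char) (l : List Char) :
    pvSplit sep l ≠ [] := by
  induction hn : l.length using Nat.strong_induction_on generalizing l with
  | _ n ihn =>
    cases l with
    | nil => simp [pvSplit]
    | cons c rest =>
      rw [pvSplit]
      by_cases hp : sep.isPrefixOf (c :: rest)
      · simp [hp]
      · simp only [hp]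
        have := ihn rest.length (by simp [← hn]) rest rfl
        cases hs' : pvSplit sep rest with
        | nil => exact absurd hs' this
        | cons a b => simp [pvModHead]

/-- first field of a split on a single space is the maximal non-space run -/
lemma pvHead_split_space (p : List Char) :
    (pvSplit [' '] p).headD [] = p.takeWhile (· ≠ ' ') := by
  induction p with
  | nil => simp [pvSplit]
  | cons c rest ih =>
    rw [pvSplit]
    by_cases hc : c = ' '
    · subst hc
      simp [List.isPrefixOf, List.takeWhile]
    · have hp : ¬ ([' '] : List Char).isPrefixOf (c :: rest) = true := by
        simp [List.isPrefixOf]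
        intro h; exact absurd h.symm hc
      simp only [hp]
      cases hs' : pvSplit [' '] rest with
      | nil => exact absurd hs' (pvSplit_ne_nil _ _)
      | cons a b =>
        rw [hs'] at ih
        simp only [pvModHead, List.headD_cons] at ih ⊢
        simp [List.takeWhile, hc, ih]

/-- skipping an initial non-space run finds the same matches -/
lemma pvFindall_drop_tok (l : List Char) :
    pvFindall l = pvFindall (l.drop ((l.takeWhile (· ≠ ' ')).length)) := by
  induction l with
  | nil => simp
  | cons c rest ih =>
    by_cases hc : c = ' '
    · subst hc; simp [List.takeWhile]
    · have hp : ¬ ([' ', 'D', ' '] : List Char).isPrefixOf (c :: rest) = true := by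
        simp [List.isPrefixOf]
        intro h; exact absurd h.symm hc
      rw [pvFindall]
      simp only [hp]
      simp only [List.takeWhile, hc, decide_not]
      simp only [ne_eq, decide_not] at ih
      simpa using ih

/-- the crux: tokens of the parts of the ' D ' split are exactly the regex captures -/
lemma pvCrux (l : List Char) :
    (pvSplit [' ', 'D', ' '] l).map (fun p => p.takeWhile (· ≠ ' ')) =
      l.takeWhile (· ≠ ' ') :: pvFindall l := by
  induction hn : l.length using Nat.strong_induction_on generalizing l with
  | _ n ihn =>
    cases l with
    | nil => simp [pvSplit, pvFindall]
    | cons c rest =>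
      rw [pvSplit, pvFindall]
      by_cases hp : ([' ', 'D', ' '] : List Char).isPrefixOf (c :: rest)
      · obtain ⟨t, ht⟩ := (List.isPrefixOf_iff_prefix.mp hp)
        simp only [hp, if_true, List.map_cons]
        have hd : List.drop (max 1 ([' ', 'D', ' '] : List Char).length) (c :: rest) = t := by
          rw [← ht]; simp
        have htw : (c :: rest).takeWhile (· ≠ ' ') = [] := by
          rw [← ht]; simp
        have ihr := ihn t.length (by rw [← hn, ← ht]; simp; omega) t rfl
        rw [hd, htw, ihr, show List.drop 3 (c :: rest) = t from by rw [← ht]; rfl,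
           ← pvFindall_drop_tok t]
        simp
      · have h2 : rest.length < n := by simp [← hn]
        have ihr := ihn rest.length h2 rest rfl
        simp only [hp]
        cases hs' : pvSplit [' ', 'D', ' '] rest with
        | nil => exact absurd hs' (pvSplit_ne_nil _ _)
        | cons a b =>
          rw [hs'] at ihr
          simp only [List.map_cons, List.cons.injEq] at ihr
          simp only [ne_eq, decide_not] at ihr
          simp only [pvModHead, Bool.false_eq_true, if_false, List.map_cons, List.cons.injEq,
            ne_eq, decide_not]
          refine ⟨?_, ihr.2⟩
          by_cases hc : c = ' '
          · subst hc; simp [List.takeWhile]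
          · simp [List.takeWhile, hc, ihr.1]

lemma pvFoldl_append_map (f : String → String) (xs : List String) (acc : List String) :
    xs.foldl (fun acc curr => acc ++ [f curr]) acc = acc ++ xs.map f := by
  induction xs generalizing acc with
  | nil => simp
  | cons x xs ih => simp [ih]

lemma pvHeadD_map (xs : List (List Char)) (h : xs ≠ []) :
    (xs.map String.ofList).headD "" = String.ofList (xs.headD []) := by
  cases xs with
  | nil => exact absurd rfl h
  | cons a b => simp

lemma pvInner (p : List Char) :
    ((PySem.Str.split? (String.ofList p) " ").getD []).headD "" =
      String.ofList (p.takeWhile (· ≠ ' ')) := by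
  simp only [PySem.Str.split?, PySem.Chars.split?, show (" ".toList) = [' '] from rfl]
  simp only [List.isEmpty_cons, Bool.false_eq_true, if_false, Option.map_some, Option.getD_some]
  rw [show (String.ofList p).toList = p by simp]
  rw [pvSplitOn_eq [' '] (by simp) p]
  rw [pvHeadD_map _ (pvSplit_ne_nil _ _), pvHead_split_space]

-- ===== VERDICT (by name: the statement is the Claim_ definition above) =====
theorem get_expr_ko_info_spec : Claim_equal_get_expr_ko_info := by
  intro line _
  show get_expr_ko_info line = get_expr_ko_info_alt line
  simp only [get_expr_ko_info, get_expr_ko_info_alt]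
  rw [show (PySem.Str.split? line " D ").getD [] =
      (pvSplit [' ', 'D', ' '] line.toList).map String.ofList from by
    simp only [PySem.Str.split?, PySem.Chars.split?, show (" D ".toList) = [' ', 'D', ' '] from rfl]
    simp only [List.isEmpty_cons, Bool.false_eq_true, if_false, Option.map_some, Option.getD_some]
    rw [pvSplitOn_eq [' ', 'D', ' '] (by simp) line.toList]]
  rw [← List.map_drop, pvFoldl_append_map]
  simp only [List.nil_append, List.map_map]
  congr 1
  have hmc : List.map ((fun curr => ((PySem.Str.split? curr " ").getD []).headD "") ∘ String.ofList)
      ((pvSplit [' ', 'D', ' '] line.toList).drop 1)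
      = List.map (String.ofList ∘ fun p => p.takeWhile (· ≠ ' '))
      ((pvSplit [' ', 'D', ' '] line.toList).drop 1) :=
    List.map_congr_left (fun p _ => pvInner p)
  rw [hmc, ← List.map_map, List.map_drop, pvCrux]
  simp
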